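-- pv_equiv track=rewrite | github.com/valterUo/quantum-portfolio | portfolio_hubo_qaoa_light.py | extract_from_latex
-- ===== SOURCE A (Python) =====
-- def extract_from_latex(latex_source):
--         """
--         Extract characters from each line starting with '\nghost' up to the tenth '&' character.
--
--         Args:
--             latex_source (str): The LaTeX source code
--
--         Returns:
--             list: Lines extracted according to the specified rule
--         """
--         depth = 100
--         extracted_lines = []
--
--         # Split the latex source into lines
--         lines = latex_source.split('\n')
--
--         # Process each line
--         for line in lines:
--             if line.strip().startswith('\\nghost'):
--                 # Count the occurrences of '&'
--                 amp_positions = [pos for pos, char in enumerate(line) if char == '&']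
--
--                 # Check if there are at least 10 '&' characters
--                 if len(amp_positions) >= depth:
--                     # Extract up to the 10th '&'
--                     extracted_portion = line[:amp_positions[depth - 1]]
--                     extracted_lines.append(extracted_portion + '\\\ \n')
--                 else:
--                     # If fewer than 10 '&' characters, take the whole line
--                     extracted_lines.append(line)
--             else:
--                 extracted_lines.append(line + '\n')
--
--         return extracted_lines
-- ===== SOURCE B (Python) =====
-- def extract_from_latex(latex_source):
--     depth = 100
--     extracted_lines = []
--     for line in latex_source.split('\n'):
--         if line.strip().startswith('\\nghost'):
--             parts = line.split('&')
--             if len(parts) > depth: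
--                 extracted_lines.append('&'.join(parts[:depth]) + '\\\\ \n')
--             else:
--                 extracted_lines.append(line)
--         else:
--             extracted_lines.append(line + '\n')
--     return extracted_lines
-- ===== Notes on version B (the rewrite author's own statement) =====
-- stated objective: simpler
-- what changed: B splits each matching line on the ampersand delimiter and rejoins the first 100 segments, instead of A's building the full list of ampersand positions via enumerate and slicing the line at the 100th position.
import Mathlib
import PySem

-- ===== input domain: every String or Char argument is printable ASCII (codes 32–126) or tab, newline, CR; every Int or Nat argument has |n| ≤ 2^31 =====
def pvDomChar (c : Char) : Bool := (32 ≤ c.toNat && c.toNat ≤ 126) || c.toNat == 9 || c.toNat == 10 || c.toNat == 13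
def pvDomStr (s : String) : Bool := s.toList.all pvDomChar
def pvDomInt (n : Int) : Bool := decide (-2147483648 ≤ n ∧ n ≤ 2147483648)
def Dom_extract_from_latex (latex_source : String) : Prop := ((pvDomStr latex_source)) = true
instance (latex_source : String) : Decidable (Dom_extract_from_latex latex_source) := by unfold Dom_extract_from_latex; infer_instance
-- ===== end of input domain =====

-- B rejoins the first 100 '&'-separated segments of each matching line instead of
-- enumerating all ampersand positions and slicing at the 100th; objective: simpler.

-- ===== PORT A =====
def extract_from_latex (latex_source : String) : List String :=
  ((PySem.Chars.splitOn latex_source.toList ['\n']).foldl (fun extracted_lines line =>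
    if PySem.Chars.startswith (PySem.Chars.strip line) "\\nghost".toList then
      let amp_positions := ((PySem.List.enumerate line).filter (fun p => p.2 == '&')).map (fun p => p.1)
      if 100 ≤ amp_positions.length then
        extracted_lines ++ [PySem.List.slice line none (some (PySem.List.pyGetD amp_positions 99 0)) ++ "\\\\ \n".toList]
      else
        extracted_lines ++ [line]
    else
      extracted_lines ++ [line ++ ['\n']]) []).map String.ofList

-- ===== PORT B =====
def extract_from_latex_alt (latex_source : String) : List String :=
  (PySem.Chars.splitOn latex_source.toList ['\n']).map (fun line =>
    String.ofList (
      if PySem.Chars.startswith (PySem.Chars.strip line) "\\nghost".toList then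
        let parts := PySem.Chars.splitOn line ['&']
        if 100 < parts.length then
          PySem.Chars.join ['&'] (PySem.List.slice parts none (some 100)) ++ "\\\\ \n".toList
        else
          line
      else
        line ++ ['\n']))

-- ===== PRECONDITION & SPEC =====
def Spec_extract_from_latex (latex_source : String) (out : List String) : Prop := out = extract_from_latex_alt latex_source
instance (latex_source : String) (out : List String) : Decidable (Spec_extract_from_latex latex_source out) := by unfold Spec_extract_from_latex; infer_instance

-- ===== CLAIM (what is proved, stated in full; the proofs are below) =====
def Claim_equal_extract_from_latex : Prop := ∀ (latex_source : String), Dom_extract_from_latex latex_source → Spec_extract_from_latex latex_source (extract_from_latex latex_source)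

-- ===== LEMMAS AND PROOFS =====

-- The segments of a line between its '&' characters, structurally.
def splitAmp : List Char → List (List Char)
  | [] => [[]]
  | c :: r => if c = '&' then [] :: splitAmp r else (splitAmp r).modifyHead (c :: ·)

-- The prefix of a line strictly before its n-th '&' (n ≥ 1).
def takeBefore : List Char → Nat → List Char
  | [], _ => []
  | c :: r, n => if c = '&' then (if n ≤ 1 then [] else '&' :: takeBefore r (n - 1)) else c :: takeBefore r n

-- The positions of the '&' characters, as naturals.
def natAmp : List Char → List Nat
  | [] => []
  | c :: r => if c = '&' then 0 :: (natAmp r).map (· + 1) else (natAmp r).map (· + 1)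

lemma modifyHead_self {α : Type} (l : List α) : List.modifyHead (fun x => x) l = l := by
  cases l <;> simp

lemma splitAmp_length (l : List Char) : (splitAmp l).length = l.count '&' + 1 := by
  induction l with
  | nil => simp [splitAmp]
  | cons c r ih => simp only [splitAmp, List.count_cons]; split_ifs with hc <;> simp_all [beq_iff_eq]

lemma splitAmp_ne_nil (l : List Char) : splitAmp l ≠ [] := by
  intro h; have := splitAmp_length l; rw [h] at this; simp at this

lemma go_spec : ∀ (fuel : Nat) (l cur : List Char) (accs : List (List Char)), l.length < fuel →
    PySem.Chars.splitOn.go ['&'] fuel l cur accs = accs.reverse ++ (splitAmp l).modifyHead (cur.reverse ++ ·) := by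
  intro fuel
  induction fuel with
  | zero => intro l cur accs h; omega
  | succ n ih =>
    intro l cur accs h
    cases l with
    | nil => simp [PySem.Chars.splitOn.go, splitAmp]
    | cons c rest =>
      rw [PySem.Chars.splitOn.go]
      by_cases hc : c = '&'
      · subst hc
        have hp : List.isPrefixOf ['&'] ('&' :: rest) = true := by simp [List.isPrefixOf]
        simp only [hp, if_pos]
        rw [show List.drop ['&'].length ('&' :: rest) = rest by simp]
        rw [ih rest [] ((List.reverse cur) :: accs) (by simp at h ⊢; omega)]
        simp [splitAmp, modifyHead_self]
      · have hp : List.isPrefixOf ['&'] (c :: rest) = false := by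
          simp only [List.isPrefixOf, Bool.and_true, beq_eq_false_iff_ne, ne_eq]
          exact fun he => hc he.symm
        simp only [hp, Bool.false_eq_true, if_false]
        rw [ih rest (c :: cur) accs (by simp at h ⊢; omega)]
        simp only [splitAmp, if_neg hc]
        obtain ⟨a, t, he⟩ : ∃ a t, splitAmp rest = a :: t := by
          cases hs : splitAmp rest with
          | nil => exact absurd hs (splitAmp_ne_nil rest)
          | cons a t => exact ⟨a, t, rfl⟩
        simp [he]

lemma splitOn_amp (l : List Char) : PySem.Chars.splitOn l ['&'] = splitAmp l := by
  rw [show PySem.Chars.splitOn l ['&'] = PySem.Chars.splitOn.go ['&'] (l.length + 1) l [] [] from rfl]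
  rw [go_spec (l.length + 1) l [] [] (by omega)]
  simp [modifyHead_self]

lemma join_modifyHead (sep : List Char) (c : Char) (x : List Char) (xs : List (List Char)) :
    PySem.Chars.join sep ((x :: xs).modifyHead (c :: ·)) = c :: PySem.Chars.join sep (x :: xs) := by
  cases xs with
  | nil => simp [PySem.Chars.join_singleton]
  | cons y t => simp [PySem.Chars.join_cons_cons]

lemma join_take (l : List Char) : ∀ n : Nat, 1 ≤ n → n ≤ l.count '&' →
    PySem.Chars.join ['&'] ((splitAmp l).take n) = takeBefore l n := by
  induction l with
  | nil => intro n h1 h2; simp at h2; omega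
  | cons c r ih =>
    intro n h1 h2
    by_cases hc : c = '&'
    · subst hc
      have hcount : ('&' :: r).count '&' = r.count '&' + 1 := by simp
      simp only [splitAmp, takeBefore, eq_self_iff_true, if_true]
      cases n with
      | zero => omega
      | succ m =>
        rw [List.take_succ_cons]
        cases hm : m with
        | zero => simp [PySem.Chars.join_singleton]
        | succ k =>
          obtain ⟨a, t, he⟩ : ∃ a t, (splitAmp r).take m = a :: t := by
            have hlen : m < (splitAmp r).length := by rw [splitAmp_length]; omega
            cases hs : (splitAmp r).take m with
            | nil =>
              exfalso
              have hl : (List.take m (splitAmp r)).length = m := by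
                rw [List.length_take]; omega
              rw [hs] at hl; simp at hl; omega
            | cons a t => exact ⟨a, t, rfl⟩
          rw [← hm, he, PySem.Chars.join_cons_cons, ← he, ih m (by omega) (by omega)]
          simp only [hm]
          have : ¬ (k + 1 + 1 ≤ 1) := by omega
          rw [if_neg this]
          simp
    · simp only [splitAmp, if_neg hc, takeBefore, if_neg hc]
      obtain ⟨a, t, he⟩ : ∃ a t, splitAmp r = a :: t := by
        cases hs : splitAmp r with
        | nil => exact absurd hs (splitAmp_ne_nil r)
        | cons a t => exact ⟨a, t, rfl⟩
      have hcount : (c :: r).count '&' = r.count '&' := by simp [hc]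
      rw [he]
      have htk : ((a :: t).modifyHead (c :: ·)).take n = ((a :: t).take n).modifyHead (c :: ·) := by
        cases n with
        | zero => omega
        | succ m => simp [List.modifyHead]
      rw [htk]
      obtain ⟨b, u, ht⟩ : ∃ b u, (a :: t).take n = b :: u := by
        cases n with
        | zero => omega
        | succ m => exact ⟨a, t.take m, by simp⟩
      rw [ht, join_modifyHead, ← ht, ← he, ih n h1 (by rw [hcount] at h2; exact h2)]

lemma ampA_eq (l : List Char) : ∀ s : Int,
    ((PySem.List.enumerate l s).filter (fun p => p.2 == '&')).map (fun p => p.1)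
      = (natAmp l).map (fun (k : Nat) => s + (k : Int)) := by
  induction l with
  | nil => intro s; simp [PySem.List.enumerate, natAmp]
  | cons c r ih =>
    intro s
    rw [PySem.List.enumerate_cons]
    by_cases hc : c = '&'
    · subst hc
      have h1 : (((s, '&') :: PySem.List.enumerate r (s+1)).filter (fun p => p.2 == '&')).map (fun p => p.1)
          = s :: ((PySem.List.enumerate r (s+1)).filter (fun p => p.2 == '&')).map (fun p => p.1) := by
        simp
      rw [h1, ih (s+1)]
      simp only [natAmp, if_true, List.map_cons, List.map_map]
      congr 1
      · simp
      · apply List.map_congr_left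
        intro a _
        simp only [Function.comp_apply]
        push_cast
        ring
    · have h1 : (((s, c) :: PySem.List.enumerate r (s+1)).filter (fun p => p.2 == '&')).map (fun p => p.1)
          = ((PySem.List.enumerate r (s+1)).filter (fun p => p.2 == '&')).map (fun p => p.1) := by
        simp [hc]
      rw [h1, ih (s+1)]
      simp only [natAmp, if_neg hc, List.map_map]
      apply List.map_congr_left
      intro a _
      simp only [Function.comp_apply]
      push_cast
      ring

lemma natAmp_length (l : List Char) : (natAmp l).length = l.count '&' := by
  induction l with
  | nil => simp [natAmp]
  | cons c r ih => simp only [natAmp, List.count_cons]; split_ifs with hc <;> simp_all [beq_iff_eq]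

lemma take_natAmp (l : List Char) : ∀ k : Nat, k < (natAmp l).length →
    l.take ((natAmp l).getD k 0) = takeBefore l (k + 1) := by
  induction l with
  | nil => intro k h; simp [natAmp] at h
  | cons c r ih =>
    intro k h
    by_cases hc : c = '&'
    · subst hc
      simp only [natAmp, if_true] at h ⊢
      cases k with
      | zero => simp [takeBefore]
      | succ m =>
        simp only [List.getD_cons_succ]
        have hm : m < (natAmp r).length := by simp at h; omega
        have : (List.map (· + 1) (natAmp r)).getD m 0 = (natAmp r).getD m 0 + 1 := by
          rw [List.getD_eq_getElem _ _ (by simpa using hm), List.getD_eq_getElem _ _ hm, List.getElem_map]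
        rw [this, List.take_succ_cons, ih m hm]
        simp only [takeBefore, if_true]
        rw [if_neg (by omega : ¬ (m + 1 + 1 ≤ 1))]
        simp
    · simp only [natAmp, if_neg hc] at h ⊢
      have hk : k < (natAmp r).length := by simpa using h
      have : (List.map (· + 1) (natAmp r)).getD k 0 = (natAmp r).getD k 0 + 1 := by
        rw [List.getD_eq_getElem _ _ (by simpa using hk), List.getD_eq_getElem _ _ hk, List.getElem_map]
      rw [this, List.take_succ_cons, ih k hk]
      simp [takeBefore, hc]

-- the two per-line computations agree
lemma line_eq (line : List Char) :
    (if PySem.Chars.startswith (PySem.Chars.strip line) "\\nghost".toList then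
      let amp_positions := ((PySem.List.enumerate line).filter (fun p => p.2 == '&')).map (fun p => p.1)
      if 100 ≤ amp_positions.length then
        PySem.List.slice line none (some (PySem.List.pyGetD amp_positions 99 0)) ++ "\\\\ \n".toList
      else line
    else line ++ ['\n'])
    = (if PySem.Chars.startswith (PySem.Chars.strip line) "\\nghost".toList then
        let parts := PySem.Chars.splitOn line ['&']
        if 100 < parts.length then
          PySem.Chars.join ['&'] (PySem.List.slice parts none (some 100)) ++ "\\\\ \n".toList
        else line
      else line ++ ['\n']) := by
  by_cases hs : PySem.Chars.startswith (PySem.Chars.strip line) "\\nghost".toList = true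
  · simp only [hs, if_true]
    have hamp : ((PySem.List.enumerate line).filter (fun p => p.2 == '&')).map (fun p => p.1)
        = (natAmp line).map (fun (k : Nat) => ((k : Int))) := by
      rw [ampA_eq line 0]
      apply List.map_congr_left
      intro a _
      simp
    have hlenA : (((PySem.List.enumerate line).filter (fun p => p.2 == '&')).map (fun p => p.1)).length
        = line.count '&' := by
      rw [hamp, List.length_map, natAmp_length]
    have hlenB : (PySem.Chars.splitOn line ['&']).length = line.count '&' + 1 := by
      rw [splitOn_amp, splitAmp_length]
    by_cases hbig : 100 ≤ line.count '&'
    · rw [if_pos (by rw [hlenA]; exact hbig), if_pos (by rw [hlenB]; omega)]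
      congr 1
      have h99 : 99 < (natAmp line).length := by rw [natAmp_length]; omega
      have hget : PySem.List.pyGetD (((PySem.List.enumerate line).filter (fun p => p.2 == '&')).map (fun p => p.1)) 99 0
          = (((natAmp line).getD 99 0 : Nat) : Int) := by
        rw [hamp, PySem.List.pyGetD_ofNat']
        rw [List.getD_eq_getElem _ _ (by simpa using h99), List.getD_eq_getElem _ _ h99, List.getElem_map]
      rw [hget, PySem.List.slice_to_natCast, take_natAmp line 99 h99]
      rw [show PySem.List.slice (PySem.Chars.splitOn line ['&']) none (some 100)
            = (PySem.Chars.splitOn line ['&']).take 100 from PySem.List.slice_to_natCast _ 100]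
      rw [splitOn_amp, join_take line 100 (by omega) hbig]
    · rw [if_neg (by rw [hlenA]; omega), if_neg (by rw [hlenB]; omega)]
  · simp only [Bool.not_eq_true] at hs
    simp only [hs, Bool.false_eq_true, if_false]

-- ===== VERDICT (by name: the statement is the Claim_ definition above) =====
theorem extract_from_latex_spec : Claim_equal_extract_from_latex := by
  intro latex_source _
  unfold Spec_extract_from_latex extract_from_latex extract_from_latex_alt
  have hfold := PySem.List.foldl_congr_mem (PySem.Chars.splitOn latex_source.toList ['\n'])
      (fun extracted_lines line =>
        if PySem.Chars.startswith (PySem.Chars.strip line) "\\nghost".toList then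
          let amp_positions := ((PySem.List.enumerate line).filter (fun p => p.2 == '&')).map (fun p => p.1)
          if 100 ≤ amp_positions.length then
            extracted_lines ++ [PySem.List.slice line none (some (PySem.List.pyGetD amp_positions 99 0)) ++ "\\\\ \n".toList]
          else extracted_lines ++ [line]
        else extracted_lines ++ [line ++ ['\n']])
      (fun extracted_lines line =>
        extracted_lines ++ [if PySem.Chars.startswith (PySem.Chars.strip line) "\\nghost".toList then
          let amp_positions := ((PySem.List.enumerate line).filter (fun p => p.2 == '&')).map (fun p => p.1)
          if 100 ≤ amp_positions.length then
            PySem.List.slice line none (some (PySem.List.pyGetD amp_positions 99 0)) ++ "\\\\ \n".toList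
          else line
        else line ++ ['\n']])
      []
      (by intro acc x _; dsimp only; split_ifs <;> rfl)
  rw [hfold, PySem.List.foldl_append_singleton_eq_map, List.nil_append, List.map_map]
  apply List.map_congr_left
  intro line _
  simp only [Function.comp_apply]
  exact congrArg String.ofList (line_eq line)
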